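-- pv_equiv track=rewrite | github.com/sanket801036/Whole-Python1 | August/test.py | even_odd_sum_difference
-- ===== SOURCE A (Python) =====
-- def even_odd_sum_difference(a):
--     even_sum = 0
--     odd_sum = 0
--
--     # Loop from 1 to 'a'
--     for i in range(1, a):
--         if i % 2 == 0:
--             even_sum += i
--         else:
--             odd_sum += i
--
--     # Calculate the result
--     result = even_sum - odd_sum
--     return result
-- ===== SOURCE B (Python) =====
-- def even_odd_sum_difference(a):
--     # closed-form value of the alternating sum of the integers below a
--     n = a - 1
--     if n <= 0:
--         return 0
--     if n % 2 == 0: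
--         return n // 2
--     return -((n + 1) // 2)
-- ===== Notes on version B (the rewrite author's own statement) =====
-- stated objective: faster
-- what changed: Replaces the loop accumulating even and odd sums with a constant-time closed-form expression for the alternating sum of the integers below a.
import Mathlib
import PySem

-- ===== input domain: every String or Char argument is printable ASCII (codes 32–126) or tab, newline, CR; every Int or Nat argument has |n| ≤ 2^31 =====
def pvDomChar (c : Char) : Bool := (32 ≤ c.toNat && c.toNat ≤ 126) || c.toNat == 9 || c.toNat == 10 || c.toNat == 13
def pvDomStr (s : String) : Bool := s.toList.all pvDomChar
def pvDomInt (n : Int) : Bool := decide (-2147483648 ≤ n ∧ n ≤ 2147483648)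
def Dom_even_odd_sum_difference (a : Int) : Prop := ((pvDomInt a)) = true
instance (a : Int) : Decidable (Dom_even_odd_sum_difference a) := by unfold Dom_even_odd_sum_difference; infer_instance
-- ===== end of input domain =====

-- faster: B replaces A's linear accumulation loop with a constant-time closed-form expression for the alternating sum of the integers below a.


-- ===== PORT A =====
def even_odd_sum_difference (a : Int) : Int :=
  let r := (PySem.List.pyRange 1 a 1).foldl
    (fun (p : Int × Int) i =>
      if PySem.Int.mod i 2 == 0 then (p.1 + i, p.2) else (p.1, p.2 + i))
    (0, 0)
  r.1 - r.2

-- ===== PORT B =====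
def even_odd_sum_difference_alt (a : Int) : Int :=
  let n := a - 1
  if n ≤ 0 then 0
  else if PySem.Int.mod n 2 == 0 then PySem.Int.floordiv n 2
  else -(PySem.Int.floordiv (n + 1) 2)

-- ===== PRECONDITION & SPEC =====
def Spec_even_odd_sum_difference (a : Int) (out : Int) : Prop := out = even_odd_sum_difference_alt a
instance (a : Int) (out : Int) : Decidable (Spec_even_odd_sum_difference a out) := by unfold Spec_even_odd_sum_difference; infer_instance

-- ===== CLAIM (what is proved, stated in full; the proofs are below) =====
def Claim_equal_even_odd_sum_difference : Prop := ∀ (a : Int), Dom_even_odd_sum_difference a → Spec_even_odd_sum_difference a (even_odd_sum_difference a)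

-- ===== LEMMAS AND PROOFS =====

-- the difference of A's two accumulators over range(1, 1+n) is the alternating-sum closed form
lemma fold_diff (n : Nat) :
    ((PySem.List.pyRange 1 (1 + (n : Int)) 1).foldl
      (fun (p : Int × Int) i =>
        if PySem.Int.mod i 2 == 0 then (p.1 + i, p.2) else (p.1, p.2 + i))
      (0, 0)).1
    - ((PySem.List.pyRange 1 (1 + (n : Int)) 1).foldl
      (fun (p : Int × Int) i =>
        if PySem.Int.mod i 2 == 0 then (p.1 + i, p.2) else (p.1, p.2 + i))
      (0, 0)).2
    = if n % 2 = 0 then (n : Int) / 2 else -(((n : Int) + 1) / 2) := by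
  induction n with
  | zero =>
    rw [show (1 : Int) + ((0 : Nat) : Int) = 1 by simp, PySem.List.pyRange_one_eq_nil le_rfl]
    simp
  | succ m ih =>
    have hcast : (1 : Int) + ((m + 1 : Nat) : Int) = (1 + (m : Int)) + 1 := by push_cast; ring
    rw [hcast, PySem.List.pyRange_one_succ_right (by omega : (1 : Int) ≤ 1 + (m : Int)),
        List.foldl_append]
    simp only [List.foldl_cons, List.foldl_nil] at ih ⊢
    simp only [PySem.Int.mod_eq_emod_of_pos (by omega : (0 : Int) < 2), beq_iff_eq] at ih ⊢
    by_cases h : (1 + (m : Int)) % 2 = 0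
    · rw [if_pos h, if_pos (show (m + 1) % 2 = 0 by omega)]
      rw [if_neg (show ¬ m % 2 = 0 by omega)] at ih
      push_cast
      omega
    · rw [if_neg h, if_neg (show ¬ (m + 1) % 2 = 0 by omega)]
      rw [if_pos (show m % 2 = 0 by omega)] at ih
      push_cast
      omega

-- ===== VERDICT (by name: the statement is the Claim_ definition above) =====
theorem even_odd_sum_difference_spec : Claim_equal_even_odd_sum_difference := by
  intro a _
  unfold Spec_even_odd_sum_difference even_odd_sum_difference even_odd_sum_difference_alt
  by_cases h : a - 1 ≤ 0
  · simp [PySem.List.pyRange_one_eq_nil (by omega : a ≤ 1), h]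
  · have ha : a = 1 + ((a - 1).toNat : Int) := by omega
    rw [ha, fold_diff]
    set m : Nat := (a - 1).toNat with hm
    simp only [show ¬((1 : Int) + (m : Int) - 1 ≤ 0) from by omega, if_false,
      PySem.Int.mod_eq_emod_of_pos (by omega : (0 : Int) < 2),
      PySem.Int.floordiv_eq_ediv_of_pos (by omega : (0 : Int) < 2)]
    by_cases hp : m % 2 = 0
    · simp only [hp, if_true, beq_iff_eq, show ((1 : Int) + m - 1) % 2 = 0 from by omega, if_true]
      omega
    · simp only [hp, if_false, beq_iff_eq, show ¬(((1 : Int) + m - 1) % 2 = 0) from by omega, if_false]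
      omega
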